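-- pv_equiv track=rewrite | github.com/vincentrcl000/TidyFile | src/tidyfile/core/batch_add_chain_tags.py | extract_tags_from_chain_tags_list
-- ===== SOURCE A (Python) =====
-- from typing import Dict, List, Any, Set, Tuple
--
-- def extract_tags_from_chain_tags_list(chain_tags_list: List[str]) -> Dict[int, Set[str]]:
--     """从链式标签列表中提取各级别标签"""
--     level_tags: Dict[int, Set[str]] = {1: set(), 2: set(), 3: set(), 4: set(), 5: set()}
--
--     for chain_tag in chain_tags_list:
--         if chain_tag and isinstance(chain_tag, str):
--             parts = [part.strip() for part in chain_tag.split('/') if part.strip()]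
--             for level, tag in enumerate(parts, 1):
--                 if level <= 5:  # 只统计前5级
--                     level_tags[level].add(tag)
--
--     return level_tags
-- ===== SOURCE B (Python) =====
-- from typing import Dict, List, Set
--
-- def extract_tags_from_chain_tags_list(chain_tags_list: List[str]) -> Dict[int, Set[str]]:
--     parsed = []
--     for chain_tag in chain_tags_list:
--         if chain_tag and isinstance(chain_tag, str):
--             parsed.append([p.strip() for p in chain_tag.split('/') if p.strip()])
--     return {lvl: {p[lvl - 1] for p in parsed if len(p) >= lvl} for lvl in range(1, 6)}
-- ===== Notes on version B (the rewrite author's own statement) =====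
-- stated objective: alternative
-- what changed: A scatters each parsed part into the per-level sets while walking every chain tag; B first builds a table of cleaned part-lists in one pass and then constructs the result column-wise, gathering each level 1-5 by a comprehension over that table.
import Mathlib
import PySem

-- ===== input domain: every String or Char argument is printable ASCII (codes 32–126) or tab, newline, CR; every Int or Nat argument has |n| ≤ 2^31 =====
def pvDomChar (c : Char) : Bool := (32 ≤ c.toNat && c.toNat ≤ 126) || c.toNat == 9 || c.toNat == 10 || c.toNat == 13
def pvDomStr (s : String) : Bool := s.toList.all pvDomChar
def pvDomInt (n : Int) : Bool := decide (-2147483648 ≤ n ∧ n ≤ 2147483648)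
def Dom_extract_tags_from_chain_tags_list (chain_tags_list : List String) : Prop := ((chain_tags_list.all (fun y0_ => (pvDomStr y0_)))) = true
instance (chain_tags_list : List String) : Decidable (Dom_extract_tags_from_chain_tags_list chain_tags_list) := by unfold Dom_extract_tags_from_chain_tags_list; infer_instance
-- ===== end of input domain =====

-- B rebuilds the same level→set dict column-wise from a precomputed table of cleaned part-lists
-- instead of scattering parts into the sets while parsing (objective: alternative decomposition).

-- ===== PORT A =====
-- parts = [part.strip() for part in chain_tag.split('/') if part.strip()]
def pvPartsA (chain_tag : String) : List String :=
  (((PySem.Str.split? chain_tag "/").getD []).filter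
      (fun part => PySem.Str.strip part ≠ "")).map PySem.Str.strip

-- body of the inner 'for level, tag in enumerate(parts, 1)' loop
def pvStepPart (d : PySem.Dict Int (PySem.Set String)) (lt : Int × String) :
    PySem.Dict Int (PySem.Set String) :=
  if lt.1 ≤ 5 then d.modify lt.1 PySem.Set.empty (fun s => PySem.Set.add s lt.2) else d

-- body of the outer 'for chain_tag in chain_tags_list' loop
def pvStepTag (d : PySem.Dict Int (PySem.Set String)) (chain_tag : String) :
    PySem.Dict Int (PySem.Set String) :=
  if chain_tag ≠ "" then
    (PySem.List.enumerate (pvPartsA chain_tag) 1).foldl pvStepPart d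
  else d

-- level_tags = {1: set(), 2: set(), 3: set(), 4: set(), 5: set()}
def pvInit : PySem.Dict Int (PySem.Set String) :=
  ((((PySem.Dict.empty.insert 1 PySem.Set.empty).insert 2 PySem.Set.empty).insert 3
      PySem.Set.empty).insert 4 PySem.Set.empty).insert 5 PySem.Set.empty

def extract_tags_from_chain_tags_list (chain_tags_list : List String) : List (Int × List String) :=
  (chain_tags_list.foldl pvStepTag pvInit).items

-- ===== PORT B =====
-- [p.strip() for p in chain_tag.split('/') if p.strip()]
def pvPartsB (chain_tag : String) : List String :=
  (((PySem.Str.split? chain_tag "/").getD []).filter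
      (fun p => PySem.Str.strip p ≠ "")).map PySem.Str.strip

def extract_tags_from_chain_tags_list_alt (chain_tags_list : List String) : List (Int × List String) :=
  let parsed := (chain_tags_list.filter (fun t => t ≠ "")).map pvPartsB
  (PySem.List.pyRange 1 6 1).map (fun lvl =>
    (lvl, PySem.Set.ofList
      ((parsed.filter (fun p => lvl ≤ (p.length : Int))).map
        (fun p => PySem.List.pyGetD p (lvl - 1) ""))))

-- ===== PRECONDITION & SPEC =====
def Spec_extract_tags_from_chain_tags_list (chain_tags_list : List String) (out : List (Int × List String)) : Prop := out = extract_tags_from_chain_tags_list_alt chain_tags_list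
instance (chain_tags_list : List String) (out : List (Int × List String)) : Decidable (Spec_extract_tags_from_chain_tags_list chain_tags_list out) := by unfold Spec_extract_tags_from_chain_tags_list; infer_instance

-- ===== CLAIM (what is proved, stated in full; the proofs are below) =====
def Claim_equal_extract_tags_from_chain_tags_list : Prop := ∀ (chain_tags_list : List String), Dom_extract_tags_from_chain_tags_list chain_tags_list → Spec_extract_tags_from_chain_tags_list chain_tags_list (extract_tags_from_chain_tags_list chain_tags_list)

-- ===== LEMMAS AND PROOFS =====

-- the inner enumerate-fold, seen through one level's getD
lemma pvInner_getD (parts : List String) (k : Int) (d : PySem.Dict Int (PySem.Set String))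
    (lvl : Int) (hk : 1 ≤ k) (hlvl : 1 ≤ lvl ∧ lvl ≤ 5) (hd : d.keys = [1, 2, 3, 4, 5]) :
    ((PySem.List.enumerate parts k).foldl pvStepPart d).keys = [1, 2, 3, 4, 5] ∧
    ((PySem.List.enumerate parts k).foldl pvStepPart d).getD lvl PySem.Set.empty =
      (if k ≤ lvl ∧ lvl < k + parts.length then
        PySem.Set.add (d.getD lvl PySem.Set.empty) (PySem.List.pyGetD parts (lvl - k) "")
      else d.getD lvl PySem.Set.empty) := by
  induction parts generalizing k d with
  | nil =>
      rw [PySem.List.enumerate_nil]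
      refine ⟨hd, ?_⟩
      rw [if_neg (by simp only [List.length_nil]; push_cast; omega)]
      rfl
  | cons x xs ih =>
      rw [PySem.List.enumerate_cons, List.foldl_cons]
      have hkeys' : (pvStepPart d (k, x)).keys = [1, 2, 3, 4, 5] := by
        by_cases hk5 : k ≤ 5
        · have hcont : d.contains k = true := by
            rw [PySem.Dict.contains_iff_mem_keys, hd]
            have : k = 1 ∨ k = 2 ∨ k = 3 ∨ k = 4 ∨ k = 5 := by omega
            rcases this with h | h | h | h | h <;> simp [h]
          simp only [pvStepPart, hk5, if_pos]
          rw [PySem.Dict.keys_modify, PySem.Dict.keys_insert_of_contains _ _ hcont, hd]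
        · simp only [pvStepPart]
          rw [if_neg (by simpa using hk5)]
          exact hd
      have hgetD' : (pvStepPart d (k, x)).getD lvl PySem.Set.empty =
          if lvl = k then PySem.Set.add (d.getD lvl PySem.Set.empty) x
          else d.getD lvl PySem.Set.empty := by
        by_cases hk5 : k ≤ 5
        · simp only [pvStepPart, hk5, if_pos]
          rw [PySem.Dict.getD_modify]
          split_ifs with h
          · rw [h]
          · rfl
        · simp only [pvStepPart]
          rw [if_neg (by simpa using hk5), if_neg (by omega)]
      obtain ⟨hK, hG⟩ := ih (k + 1) (pvStepPart d (k, x)) (by omega) hkeys'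
      refine ⟨hK, ?_⟩
      rw [hG, hgetD']
      by_cases h : lvl = k
      · subst h
        rw [if_neg (by omega), if_pos rfl, if_pos (by simp only [List.length_cons]; push_cast; omega), sub_self,
          PySem.List.pyGetD_of_nonneg _ _ le_rfl]
        rfl
      · simp only [if_neg h]
        by_cases h2 : k + 1 ≤ lvl ∧ lvl < k + 1 + (xs.length : Int)
        · rw [if_pos h2, if_pos (by simp only [List.length_cons]; push_cast; omega)]
          rw [show (PySem.List.pyGetD (x :: xs) (lvl - k) "") = PySem.List.pyGetD xs (lvl - (k+1)) "" by
            rw [PySem.List.pyGetD_of_nonneg _ _ (by omega), PySem.List.pyGetD_of_nonneg _ _ (by omega)]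
            have h1 : (lvl - k).toNat = (lvl - (k+1)).toNat + 1 := by omega
            rw [h1]; rfl]
        · rw [if_neg h2, if_neg (by simp only [List.length_cons]; push_cast; omega)]

-- the outer fold, seen through one level's getD, equals the column fold over parsed
lemma pvOuter_getD (l : List String) (d : PySem.Dict Int (PySem.Set String)) (lvl : Int)
    (hlvl : 1 ≤ lvl ∧ lvl ≤ 5) (hd : d.keys = [1, 2, 3, 4, 5]) :
    (l.foldl pvStepTag d).keys = [1, 2, 3, 4, 5] ∧
    (l.foldl pvStepTag d).getD lvl PySem.Set.empty =
      ((l.filter (fun t => t ≠ "")).map pvPartsB).foldl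
        (fun s p => if lvl ≤ (p.length : Int) then PySem.Set.add s (PySem.List.pyGetD p (lvl - 1) "") else s)
        (d.getD lvl PySem.Set.empty) := by
  induction l generalizing d with
  | nil => exact ⟨hd, rfl⟩
  | cons t ts ih =>
      rw [List.foldl_cons]
      by_cases ht : t = ""
      · have hstep : pvStepTag d t = d := by
          simp [pvStepTag, ht]
        rw [hstep]
        obtain ⟨hK, hG⟩ := ih d hd
        refine ⟨hK, ?_⟩
        rw [hG]
        simp [ht]
      · have hstep : pvStepTag d t =
            (PySem.List.enumerate (pvPartsA t) 1).foldl pvStepPart d := by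
          simp [pvStepTag, ht]
        rw [hstep]
        obtain ⟨hK1, hG1⟩ := pvInner_getD (pvPartsA t) 1 d lvl le_rfl hlvl hd
        obtain ⟨hK, hG⟩ := ih _ hK1
        refine ⟨hK, ?_⟩
        rw [hG, hG1]
        have hfil : (t :: ts).filter (fun t => t ≠ "") = t :: ts.filter (fun t => t ≠ "") := by
          simp [ht]
        rw [hfil, List.map_cons, List.foldl_cons]
        have hAB : pvPartsB t = pvPartsA t := rfl
        rw [hAB]
        by_cases hc : lvl ≤ ((pvPartsA t).length : Int)
        · rw [if_pos (by constructor <;> omega), if_pos hc]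
        · rw [if_neg (by omega), if_neg hc]

lemma pvCol_fold (parsed : List (List String)) (lvl : Int) (s : PySem.Set String) :
    ((parsed.filter (fun p => lvl ≤ (p.length : Int))).map
        (fun p => PySem.List.pyGetD p (lvl - 1) "")).foldl PySem.Set.add s =
      parsed.foldl
        (fun s p => if lvl ≤ (p.length : Int) then PySem.Set.add s (PySem.List.pyGetD p (lvl - 1) "") else s)
        s := by
  rw [List.foldl_map, List.foldl_filter]
  simp

-- ===== VERDICT (by name: the statement is the Claim_ definition above) =====
theorem extract_tags_from_chain_tags_list_spec : Claim_equal_extract_tags_from_chain_tags_list := by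
  intro l _
  unfold Spec_extract_tags_from_chain_tags_list
  unfold extract_tags_from_chain_tags_list extract_tags_from_chain_tags_list_alt
  have hinit : pvInit.keys = [1, 2, 3, 4, 5] := by decide
  have h1 := pvOuter_getD l pvInit 1 (by omega) hinit
  have h2 := pvOuter_getD l pvInit 2 (by omega) hinit
  have h3 := pvOuter_getD l pvInit 3 (by omega) hinit
  have h4 := pvOuter_getD l pvInit 4 (by omega) hinit
  have h5 := pvOuter_getD l pvInit 5 (by omega) hinit
  rw [PySem.Dict.items_eq_map_keys _ (by rw [h1.1]; decide) PySem.Set.empty, h1.1]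
  have hrange : PySem.List.pyRange 1 6 1 = [1, 2, 3, 4, 5] := by decide
  rw [hrange]
  simp only [List.map_cons, List.map_nil]
  have hinitD : ∀ lvl : Int, pvInit.getD lvl PySem.Set.empty = PySem.Set.empty := by
    intro lvl
    by_cases hl : lvl = 1 ∨ lvl = 2 ∨ lvl = 3 ∨ lvl = 4 ∨ lvl = 5
    · rcases hl with h | h | h | h | h <;> subst h <;> decide
    · push Not at hl
      simp only [pvInit]
      rw [PySem.Dict.getD_insert, if_neg hl.2.2.2.2, PySem.Dict.getD_insert,
        if_neg hl.2.2.2.1, PySem.Dict.getD_insert, if_neg hl.2.2.1, PySem.Dict.getD_insert,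
        if_neg hl.2.1, PySem.Dict.getD_insert, if_neg hl.1]
      rfl
  rw [h1.2, h2.2, h3.2, h4.2, h5.2, hinitD, hinitD, hinitD, hinitD, hinitD]
  simp only [PySem.Set.ofList_eq_foldl, pvCol_fold]
  rfl
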